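-- pv_equiv track=rewrite | github.com/ashishk1331/advent-of-code-2015 | Day 5/doesnt_he_have_internelves_for_this.py | part_two
-- ===== SOURCE A (Python) =====
-- def part_two(data):
-- 	count = 0
-- 	for word in data:
-- 		two = False
-- 		for i in range(0, len(word) - 1):
-- 			if word[i+2:].find(word[i:i+2]) > -1:
-- 				two = True
-- 				break
--
-- 		three = False
-- 		for i in range(0, len(word) - 2):
-- 			if word[i] == word[i+2]:
-- 				three = True
-- 				break
--
-- 		if two and three:
-- 			count += 1
--
-- 	return count
-- ===== SOURCE B (Python) =====
-- def part_two(data):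
--     count = 0
--     for word in data:
--         first = {}
--         two = False
--         three = False
--         for i in range(len(word) - 1):
--             p = word[i:i+2]
--             if p in first:
--                 if i - first[p] >= 2:
--                     two = True
--             else:
--                 first[p] = i
--             if i + 2 < len(word) and word[i] == word[i+2]:
--                 three = True
--         if two and three:
--             count += 1
--     return count
-- ===== Notes on version B (the rewrite author's own statement) =====
-- stated objective: alternative
-- what changed: Replaces the nested substring-search loops (str.find over the remaining suffix for every position, plus a separate loop for the xyx pattern) by a single pass per word that records the first-seen index of each two-letter pair in a dict and detects a non-overlapping repeat and the xyx pattern in the same loop.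
import Mathlib
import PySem

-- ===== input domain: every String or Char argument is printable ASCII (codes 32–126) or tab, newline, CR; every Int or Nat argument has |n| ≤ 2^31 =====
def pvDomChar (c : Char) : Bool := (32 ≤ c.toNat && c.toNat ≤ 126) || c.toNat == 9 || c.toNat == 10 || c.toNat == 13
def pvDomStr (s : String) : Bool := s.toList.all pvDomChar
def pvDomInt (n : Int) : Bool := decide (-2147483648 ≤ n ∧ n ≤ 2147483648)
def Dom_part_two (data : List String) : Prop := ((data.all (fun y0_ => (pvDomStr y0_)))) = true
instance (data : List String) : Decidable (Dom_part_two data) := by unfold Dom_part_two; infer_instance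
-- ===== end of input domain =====

-- B replaces A's nested substring searches per word by a single pass with a dict of first-seen
-- pair indices (alternative algorithm; not measured faster on the generated inputs).

-- ===== PORT A =====
-- 'for i in range(0, len(word)-1): if word[i+2:].find(word[i:i+2]) > -1: two = True; break'
def aTwoLoop (w : List Char) : List Int → Bool
  | [] => false
  | i :: rest =>
    if PySem.Chars.find (PySem.List.slice w (some (i + 2)) none)
        (PySem.List.slice w (some i) (some (i + 2))) > -1 then true
    else aTwoLoop w rest

-- 'for i in range(0, len(word)-2): if word[i] == word[i+2]: three = True; break'
def aThreeLoop (w : List Char) : List Int → Bool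
  | [] => false
  | i :: rest =>
    if PySem.List.pyGet? w i == PySem.List.pyGet? w (i + 2) then true
    else aThreeLoop w rest

def part_two (data : List String) : Int :=
  data.foldl (fun count word =>
    let w := word.toList
    let two := aTwoLoop w (PySem.List.pyRange 0 ((w.length : Int) - 1))
    let three := aThreeLoop w (PySem.List.pyRange 0 ((w.length : Int) - 2))
    if two && three then count + 1 else count) 0

-- ===== PORT B =====
-- one iteration of B's single loop: state = (first-seen dict, two, three)
def bStep (w : List Char) (st : PySem.Dict (List Char) Int × Bool × Bool) (i : Int) :
    PySem.Dict (List Char) Int × Bool × Bool :=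
  let p := PySem.List.slice w (some i) (some (i + 2))
  let ft :=
    match st.1.get? p with
    | some j => (st.1, if 2 ≤ i - j then true else st.2.1)
    | none => (st.1.insert p i, st.2.1)
  let three :=
    if decide (i + 2 < (w.length : Int)) &&
        (PySem.List.pyGet? w i == PySem.List.pyGet? w (i + 2)) then true
    else st.2.2
  (ft.1, ft.2, three)

def part_two_alt (data : List String) : Int :=
  data.foldl (fun count word =>
    let w := word.toList
    let st := (PySem.List.pyRange 0 ((w.length : Int) - 1)).foldl (bStep w)
      (PySem.Dict.empty, false, false)
    if st.2.1 && st.2.2 then count + 1 else count) 0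

-- ===== PRECONDITION & SPEC =====
def Spec_part_two (data : List String) (out : Int) : Prop := out = part_two_alt data
instance (data : List String) (out : Int) : Decidable (Spec_part_two data out) := by unfold Spec_part_two; infer_instance

-- ===== CLAIM (what is proved, stated in full; the proofs are below) =====
def Claim_equal_part_two : Prop := ∀ (data : List String), Dom_part_two data → Spec_part_two data (part_two data)

-- ===== LEMMAS AND PROOFS =====

-- the pair word[i:i+2] at a Nat position
def pvPair (w : List Char) (i : Nat) : List Char := (w.drop i).take 2

-- B's fold over the first n indices
def bFoldAux (w : List Char) (n : Nat) : PySem.Dict (List Char) Int × Bool × Bool :=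
  (List.range n).foldl (fun st (k : Nat) => bStep w st (Int.ofNat k)) (PySem.Dict.empty, false, false)

-- find? on range n returns the least index satisfying p
lemma find?_range_min {p : Nat → Bool} : ∀ {n j : Nat}, (List.range n).find? p = some j →
    ∀ i, i < j → ¬ p i := by
  intro n
  induction n with
  | zero => simp
  | succ n ih =>
    intro j h i hij
    rw [List.range_succ, List.find?_append] at h
    cases hfn : (List.range n).find? p with
    | some j0 => rw [hfn] at h; simp at h; exact ih (hfn.trans (by rw [h])) i hij
    | none =>
      rw [hfn] at h; simp at h
      obtain ⟨hpn, hj⟩ := h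
      have := List.find?_eq_none.mp hfn i (by simp; omega)
      simp_all

lemma aTwoLoop_any (w : List Char) (L : List Int) :
    aTwoLoop w L = L.any (fun i => decide (PySem.Chars.find (PySem.List.slice w (some (i + 2)) none)
      (PySem.List.slice w (some i) (some (i + 2))) > -1)) := by
  induction L with
  | nil => rfl
  | cons i rest ih => simp only [aTwoLoop, ih]; split_ifs with h <;> simp [h]

lemma aThreeLoop_any (w : List Char) (L : List Int) :
    aThreeLoop w L = L.any (fun i => PySem.List.pyGet? w i == PySem.List.pyGet? w (i + 2)) := by
  induction L with
  | nil => rfl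
  | cons i rest ih =>
    simp only [aThreeLoop, ih]
    split_ifs with h
    · simp [beq_iff_eq] at h; simp [h]
    · simp [beq_iff_eq] at h; simp [h]

-- characterisation of A's 'two' flag
lemma aTwo_iff (w : List Char) :
    aTwoLoop w (PySem.List.pyRange 0 ((w.length : Int) - 1)) = true ↔
    ∃ i j : Nat, i + 2 ≤ j ∧ j + 2 ≤ w.length ∧ pvPair w i = pvPair w j := by
  rw [aTwoLoop_any, List.any_eq_true]
  constructor
  · rintro ⟨x, hx, hp⟩
    rw [PySem.List.mem_pyRange_one] at hx
    obtain ⟨hx0, hx1⟩ := hx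
    simp only [decide_eq_true_eq] at hp
    have hxi : x = ((x.toNat : Nat) : Int) := by omega
    set i := x.toNat with hidef
    have hilen : i + 2 ≤ w.length := by omega
    rw [hxi, show ((i : Int) + 2) = ((i + 2 : Nat) : Int) by push_cast; ring,
      PySem.List.slice_natCast, PySem.List.slice_from_natCast,
      show (i + 2) - i = 2 from by omega] at hp
    have hinf : (w.drop i).take 2 <:+: w.drop (i + 2) :=
      (PySem.Chars.find_nonneg_iff _ _).mp (by omega)
    obtain ⟨k, hpre⟩ := (PySem.Chars.exists_prefix_drop_iff_isIn _ _).mpr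
      ((PySem.Chars.isIn_iff_infix _ _).mpr hinf)
    rw [List.drop_drop] at hpre
    have hlen2 : ((w.drop i).take 2).length = 2 := by
      simp [List.length_take, List.length_drop]; omega
    have hplen := hpre.length_le
    rw [hlen2, List.length_drop] at hplen
    refine ⟨i, (i + 2) + k, by omega, by omega, ?_⟩
    rw [List.prefix_iff_eq_take] at hpre
    rw [hlen2] at hpre
    exact hpre
  · rintro ⟨i, j, hij, hjlen, hpq⟩
    refine ⟨(i : Int), ?_, ?_⟩
    · rw [PySem.List.mem_pyRange_one]
      constructor
      · positivity
      · have : i + 4 ≤ w.length := by omega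
        omega
    · simp only [decide_eq_true_eq]
      rw [show ((i : Int) + 2) = ((i + 2 : Nat) : Int) by push_cast; ring,
        PySem.List.slice_natCast, PySem.List.slice_from_natCast,
        show (i + 2) - i = 2 from by omega]
      have hpre : (w.drop i).take 2 <+: (w.drop (i + 2)).drop (j - (i + 2)) := by
        rw [List.drop_drop, show (i + 2) + (j - (i + 2)) = j from by omega]
        show pvPair w i <+: w.drop j
        rw [hpq]
        exact List.take_prefix _ _
      have hisin := (PySem.Chars.exists_prefix_drop_iff_isIn _ _).mp ⟨j - (i + 2), hpre⟩
      have := (PySem.Chars.find_nonneg_iff _ _).mpr ((PySem.Chars.isIn_iff_infix _ _).mp hisin)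
      omega

-- characterisation of A's 'three' flag
lemma aThree_iff (w : List Char) :
    aThreeLoop w (PySem.List.pyRange 0 ((w.length : Int) - 2)) = true ↔
    ∃ i : Nat, i + 2 < w.length ∧ w[i]? = w[i + 2]? := by
  rw [aThreeLoop_any, List.any_eq_true]
  constructor
  · rintro ⟨x, hx, hp⟩
    rw [PySem.List.mem_pyRange_one] at hx
    obtain ⟨hx0, hx1⟩ := hx
    have hxi : x = ((x.toNat : Nat) : Int) := by omega
    set i := x.toNat with hidef
    rw [hxi, show ((i : Int) + 2) = ((i + 2 : Nat) : Int) by push_cast; ring,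
      PySem.List.pyGet?_natCast, PySem.List.pyGet?_natCast, beq_iff_eq] at hp
    exact ⟨i, by omega, hp⟩
  · rintro ⟨i, hilen, hp⟩
    refine ⟨(i : Int), ?_, ?_⟩
    · rw [PySem.List.mem_pyRange_one]
      constructor
      · positivity
      · omega
    · rw [show ((i : Int) + 2) = ((i + 2 : Nat) : Int) by push_cast; ring,
        PySem.List.pyGet?_natCast, PySem.List.pyGet?_natCast, beq_iff_eq]
      exact hp

-- invariant of B's loop after n iterations
lemma bFold_inv (w : List Char) (n : Nat) (hn : n + 1 ≤ w.length) :
    (∀ p : List Char, (bFoldAux w n).1.get? p =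
        ((List.range n).find? (fun i => pvPair w i == p)).map (fun k : Nat => (k : Int)))
    ∧ (bFoldAux w n).2.1 = decide (∃ j < n, ∃ i < j, i + 2 ≤ j ∧ pvPair w i = pvPair w j)
    ∧ (bFoldAux w n).2.2 = decide (∃ i < n, i + 2 < w.length ∧ w[i]? = w[i + 2]?) := by
  induction n with
  | zero =>
    refine ⟨fun p => ?_, by simp [bFoldAux], by simp [bFoldAux]⟩
    simp [bFoldAux, PySem.Dict.empty, PySem.Dict.get?]
  | succ n ih =>
    obtain ⟨ihd, iht, ihh⟩ := ih (by omega)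
    have hstep : bFoldAux w (n + 1) = bStep w (bFoldAux w n) (n : Int) := by
      unfold bFoldAux
      rw [List.range_succ, List.foldl_append]
      rfl
    have hpn : PySem.List.slice w (some (n : Int)) (some ((n : Int) + 2)) = pvPair w n := by
      rw [show ((n : Int) + 2) = ((n + 2 : Nat) : Int) by push_cast; ring,
        PySem.List.slice_natCast, show (n + 2) - n = 2 from by omega]
      rfl
    have hget := ihd (pvPair w n)
    cases hf : (List.range n).find? (fun i => pvPair w i == pvPair w n) with
    | some j0 =>
      rw [hf] at hget
      simp only [Option.map_some] at hget
      have hj0eq : pvPair w j0 = pvPair w n := by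
        have := List.find?_some hf; simpa [beq_iff_eq] using this
      have hj0lt : j0 < n := by
        have := List.mem_of_find?_eq_some hf; simpa [List.mem_range] using this
      have hj0min := find?_range_min hf
      rw [hstep]
      simp only [bStep, hpn, hget]
      refine ⟨fun p => ?_, ?_, ?_⟩
      · -- dict unchanged
        by_cases hp : p = pvPair w n
        · subst hp
          rw [List.range_succ, List.find?_append, hf]
          simpa using hget
        · have hnil : List.find? (fun i => pvPair w i == p) [n] = none := by
            simp [beq_iff_eq]; exact fun h => hp h.symm
          rw [List.range_succ, List.find?_append, hnil, Option.or_none]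
          exact ihd p
      · -- two flag
        split_ifs with h2
        · symm; rw [decide_eq_true_eq]
          exact ⟨n, by omega, j0, by omega, by omega, hj0eq⟩
        · rw [iht, decide_eq_decide]
          constructor
          · rintro ⟨j, hj, i, hij, hij2, hpq⟩
            exact ⟨j, by omega, i, hij, hij2, hpq⟩
          · rintro ⟨j, hj, i, hij, hij2, hpq⟩
            by_cases hj' : j < n
            · exact ⟨j, hj', i, hij, hij2, hpq⟩
            · have hjn : j = n := by omega
              rw [hjn] at hpq hij2
              exfalso
              have hpi : (fun i' => pvPair w i' == pvPair w n) i = true := by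
                simp [hpq]
              have : ¬ i < j0 := fun hlt => hj0min i hlt hpi
              omega
      · -- three flag
        split_ifs with h3
        · simp only [Bool.and_eq_true, decide_eq_true_eq] at h3
          obtain ⟨h3a, h3b⟩ := h3
          rw [show ((n : Int) + 2) = ((n + 2 : Nat) : Int) by push_cast; ring,
            PySem.List.pyGet?_natCast, PySem.List.pyGet?_natCast, beq_iff_eq] at h3b
          symm; rw [decide_eq_true_eq]
          exact ⟨n, by omega, by exact_mod_cast h3a, h3b⟩
        · rw [ihh, decide_eq_decide]
          simp only [Bool.and_eq_true, decide_eq_true_eq, not_and] at h3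
          constructor
          · rintro ⟨i, hi, hil, hpq⟩
            exact ⟨i, by omega, hil, hpq⟩
          · rintro ⟨i, hi, hil, hpq⟩
            by_cases hi' : i < n
            · exact ⟨i, hi', hil, hpq⟩
            · have hin : i = n := by omega
              rw [hin] at hil hpq
              exfalso
              have hcast : (n : Int) + 2 < (w.length : Int) := by exact_mod_cast hil
              have hne := h3 hcast
              rw [show ((n : Int) + 2) = ((n + 2 : Nat) : Int) by push_cast; ring,
                PySem.List.pyGet?_natCast, PySem.List.pyGet?_natCast, beq_iff_eq] at hne
              exact hne hpq
    | none =>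
      rw [hf] at hget
      simp only [Option.map_none] at hget
      have hnone : ∀ i < n, pvPair w i ≠ pvPair w n := by
        intro i hi
        have := List.find?_eq_none.mp hf i (by simpa [List.mem_range] using hi)
        simpa [beq_iff_eq] using this
      rw [hstep]
      simp only [bStep, hpn, hget]
      refine ⟨fun p => ?_, ?_, ?_⟩
      · by_cases hp : p = pvPair w n
        · subst hp
          rw [PySem.Dict.get?_insert_self, List.range_succ, List.find?_append, hf]
          simp [List.find?]
        · have hnil : List.find? (fun i => pvPair w i == p) [n] = none := by
            simp [beq_iff_eq]; exact fun h => hp h.symm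
          rw [PySem.Dict.get?_insert_of_ne _ _ hp, List.range_succ, List.find?_append, hnil,
            Option.or_none]
          exact ihd p
      · rw [iht, decide_eq_decide]
        constructor
        · rintro ⟨j, hj, i, hij, hij2, hpq⟩
          exact ⟨j, by omega, i, hij, hij2, hpq⟩
        · rintro ⟨j, hj, i, hij, hij2, hpq⟩
          by_cases hj' : j < n
          · exact ⟨j, hj', i, hij, hij2, hpq⟩
          · have hjn : j = n := by omega
            rw [hjn] at hpq
            exact absurd hpq (hnone i (by omega))
      · split_ifs with h3
        · simp only [Bool.and_eq_true, decide_eq_true_eq] at h3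
          obtain ⟨h3a, h3b⟩ := h3
          rw [show ((n : Int) + 2) = ((n + 2 : Nat) : Int) by push_cast; ring,
            PySem.List.pyGet?_natCast, PySem.List.pyGet?_natCast, beq_iff_eq] at h3b
          symm; rw [decide_eq_true_eq]
          exact ⟨n, by omega, by exact_mod_cast h3a, h3b⟩
        · rw [ihh, decide_eq_decide]
          simp only [Bool.and_eq_true, decide_eq_true_eq, not_and] at h3
          constructor
          · rintro ⟨i, hi, hil, hpq⟩
            exact ⟨i, by omega, hil, hpq⟩
          · rintro ⟨i, hi, hil, hpq⟩
            by_cases hi' : i < n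
            · exact ⟨i, hi', hil, hpq⟩
            · have hin : i = n := by omega
              rw [hin] at hil hpq
              exfalso
              have hcast : (n : Int) + 2 < (w.length : Int) := by exact_mod_cast hil
              have hne := h3 hcast
              rw [show ((n : Int) + 2) = ((n + 2 : Nat) : Int) by push_cast; ring,
                PySem.List.pyGet?_natCast, PySem.List.pyGet?_natCast, beq_iff_eq] at hne
              exact hne hpq

-- per-word agreement of the two flag computations
lemma word_eq (w : List Char) :
    (aTwoLoop w (PySem.List.pyRange 0 ((w.length : Int) - 1)) &&
     aThreeLoop w (PySem.List.pyRange 0 ((w.length : Int) - 2)))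
    = (((PySem.List.pyRange 0 ((w.length : Int) - 1)).foldl (bStep w)
        (PySem.Dict.empty, false, false)).2.1 &&
       ((PySem.List.pyRange 0 ((w.length : Int) - 1)).foldl (bStep w)
        (PySem.Dict.empty, false, false)).2.2) := by
  by_cases h0 : w.length = 0
  · rw [h0]
    rw [show ((0 : Nat) : Int) - 1 = -1 from by norm_num,
      show ((0 : Nat) : Int) - 2 = -2 from by norm_num,
      PySem.List.pyRange_one_eq_nil (by norm_num : (-1 : Int) ≤ 0),
      PySem.List.pyRange_one_eq_nil (by norm_num : (-2 : Int) ≤ 0)]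
    rfl
  · obtain ⟨m, hm⟩ : ∃ m, w.length = m + 1 := ⟨w.length - 1, by omega⟩
    have hR : PySem.List.pyRange 0 ((w.length : Int) - 1) =
        (List.range m).map (fun k : Nat => (k : Int)) := by
      rw [hm, show (((m + 1 : Nat) : Int) - 1) = ((m : Nat) : Int) by push_cast; ring]
      exact PySem.List.pyRange_zero_natCast m
    have hfold : (PySem.List.pyRange 0 ((w.length : Int) - 1)).foldl (bStep w)
        (PySem.Dict.empty, false, false) = bFoldAux w m := by
      rw [hR, List.foldl_map]
      rfl
    obtain ⟨_, iht, ihh⟩ := bFold_inv w m (by omega)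
    rw [hfold, iht, ihh]
    have hA2 : aTwoLoop w (PySem.List.pyRange 0 ((w.length : Int) - 1))
        = decide (∃ j < m, ∃ i < j, i + 2 ≤ j ∧ pvPair w i = pvPair w j) := by
      rw [Bool.eq_iff_iff, aTwo_iff, decide_eq_true_eq]
      constructor
      · rintro ⟨i, j, hij, hjl, hpq⟩
        exact ⟨j, by omega, i, by omega, hij, hpq⟩
      · rintro ⟨j, hj, i, hil, hij2, hpq⟩
        exact ⟨i, j, hij2, by omega, hpq⟩
    have hA3 : aThreeLoop w (PySem.List.pyRange 0 ((w.length : Int) - 2))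
        = decide (∃ i < m, i + 2 < w.length ∧ w[i]? = w[i + 2]?) := by
      rw [Bool.eq_iff_iff, aThree_iff, decide_eq_true_eq]
      constructor
      · rintro ⟨i, hil, hpq⟩
        exact ⟨i, by omega, hil, hpq⟩
      · rintro ⟨i, _, hil, hpq⟩
        exact ⟨i, hil, hpq⟩
    rw [hA2, hA3]

-- ===== VERDICT (by name: the statement is the Claim_ definition above) =====
theorem part_two_spec : Claim_equal_part_two := by
  intro data _
  unfold Spec_part_two part_two part_two_alt
  have hf : (fun (count : Int) (word : String) =>
      let w := word.toList
      let two := aTwoLoop w (PySem.List.pyRange 0 ((w.length : Int) - 1))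
      let three := aThreeLoop w (PySem.List.pyRange 0 ((w.length : Int) - 2))
      if two && three then count + 1 else count)
      = (fun (count : Int) (word : String) =>
      let w := word.toList
      let st := (PySem.List.pyRange 0 ((w.length : Int) - 1)).foldl (bStep w)
        (PySem.Dict.empty, false, false)
      if st.2.1 && st.2.2 then count + 1 else count) := by
    funext count word
    simp only []
    rw [word_eq]
  rw [hf]
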